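-- pv_equiv track=rewrite | github.com/cvelers/eng_conductor | backend/tools/response_formatter.py | pretty_key
-- ===== SOURCE A (Python) =====
-- _UNIT_SUFFIXES = [
--     ("_kNm", " (kNm)"),
--     ("_kN", " (kN)"),
--     ("_MPa", " (MPa)"),
--     ("_GPa", " (GPa)"),
--     ("_mm", " (mm)"),
--     ("_cm2", " (cm²)"),
--     ("_cm3", " (cm³)"),
--     ("_cm4", " (cm⁴)"),
--     ("_m", " (m)"),
-- ]
--
-- _KEY_SUBSCRIPTS: dict[str, str] = {
--     "M_Rd": "M<sub>Rd</sub>",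
--     "N_Rd": "N<sub>Rd</sub>",
--     "V_Rd": "V<sub>Rd</sub>",
--     "M_Ed": "M<sub>Ed</sub>",
--     "N_Ed": "N<sub>Ed</sub>",
--     "V_Ed": "V<sub>Ed</sub>",
--     "N_b_Rd": "N<sub>b,Rd</sub>",
--     "Fv_Rd": "F<sub>v,Rd</sub>",
--     "Fv": "F<sub>v</sub>",
--     "fy": "f<sub>y</sub>",
--     "fu": "f<sub>u</sub>",
--     "fub": "f<sub>ub</sub>",
--     "Wpl": "W<sub>pl</sub>",
--     "Wel": "W<sub>el</sub>",
--     "L_cr": "L<sub>cr</sub>",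
--     "gamma_M0": "γ<sub>M0</sub>",
--     "gamma_M1": "γ<sub>M1</sub>",
--     "gamma_M2": "γ<sub>M2</sub>",
--     "alpha_v": "α<sub>v</sub>",
-- }
--
-- def pretty_key(key: str) -> str:
--     unit = ""
--     base = key
--     for suffix, label in _UNIT_SUFFIXES:
--         if base.endswith(suffix):
--             unit = label
--             base = base[: -len(suffix)]
--             break
--
--     sorted_subs = sorted(_KEY_SUBSCRIPTS.items(), key=lambda x: -len(x[0]))
--     for pattern, replacement in sorted_subs:
--         if base == pattern:
--             return replacement + unit
--         if base.startswith(pattern + "_"):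
--             rest = base[len(pattern) + 1 :].replace("_", " ")
--             return f"{replacement} {rest}" + unit
--
--     return base.replace("_", " ") + unit
-- ===== SOURCE B (Python) =====
-- _UNIT_SUFFIXES = [
--     ("_kNm", " (kNm)"),
--     ("_kN", " (kN)"),
--     ("_MPa", " (MPa)"),
--     ("_GPa", " (GPa)"),
--     ("_mm", " (mm)"),
--     ("_cm2", " (cm²)"),
--     ("_cm3", " (cm³)"),
--     ("_cm4", " (cm⁴)"),
--     ("_m", " (m)"),
-- ]
--
-- _KEY_SUBSCRIPTS = {
--     "M_Rd": "M<sub>Rd</sub>",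
--     "N_Rd": "N<sub>Rd</sub>",
--     "V_Rd": "V<sub>Rd</sub>",
--     "M_Ed": "M<sub>Ed</sub>",
--     "N_Ed": "N<sub>Ed</sub>",
--     "V_Ed": "V<sub>Ed</sub>",
--     "N_b_Rd": "N<sub>b,Rd</sub>",
--     "Fv_Rd": "F<sub>v,Rd</sub>",
--     "Fv": "F<sub>v</sub>",
--     "fy": "f<sub>y</sub>",
--     "fu": "f<sub>u</sub>",
--     "fub": "f<sub>ub</sub>",
--     "Wpl": "W<sub>pl</sub>",
--     "Wel": "W<sub>el</sub>",
--     "L_cr": "L<sub>cr</sub>",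
--     "gamma_M0": "γ<sub>M0</sub>",
--     "gamma_M1": "γ<sub>M1</sub>",
--     "gamma_M2": "γ<sub>M2</sub>",
--     "alpha_v": "α<sub>v</sub>",
-- }
--
-- def pretty_key(key: str) -> str:
--     unit = ""
--     base = key
--     for suffix, label in _UNIT_SUFFIXES:
--         if base.endswith(suffix):
--             unit = label
--             base = base[: -len(suffix)]
--             break
--
--     sub = _KEY_SUBSCRIPTS.get(base)
--     if sub is not None:
--         return sub + unit
--
--     # scan underscore split points from the right: longest prefix first
--     for i in range(len(base) - 1, -1, -1):
--         if base[i] == "_":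
--             sub = _KEY_SUBSCRIPTS.get(base[:i])
--             if sub is not None:
--                 rest = base[i + 1 :].replace("_", " ")
--                 return f"{sub} {rest}" + unit
--
--     return base.replace("_", " ") + unit
-- ===== Notes on version B (the rewrite author's own statement) =====
-- stated objective: alternative
-- what changed: B replaces A's scan of the length-sorted 19-entry subscript table (an equality plus a startswith test per entry) by a direct dict lookup of the whole base followed by a right-to-left scan of the underscore positions of the key, looking up each prefix base[:i] in the dict (longest prefix first); the unit-suffix loop is unchanged.
import Mathlib
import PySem

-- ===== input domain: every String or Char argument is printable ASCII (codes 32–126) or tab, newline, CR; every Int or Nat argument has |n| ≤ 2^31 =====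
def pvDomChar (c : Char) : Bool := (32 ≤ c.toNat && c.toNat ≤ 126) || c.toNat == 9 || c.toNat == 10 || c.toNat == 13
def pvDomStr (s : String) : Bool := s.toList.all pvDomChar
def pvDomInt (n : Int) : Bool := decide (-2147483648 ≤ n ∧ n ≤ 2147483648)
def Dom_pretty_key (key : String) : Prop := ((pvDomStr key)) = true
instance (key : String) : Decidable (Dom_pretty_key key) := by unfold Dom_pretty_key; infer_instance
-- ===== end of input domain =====

-- B replaces A's scan of the length-sorted subscript table (19 startswith tests) by a direct dict
-- lookup plus a right-to-left scan of the underscore split points of the key (objective: alternative).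

-- shared module constants (_UNIT_SUFFIXES and _KEY_SUBSCRIPTS of the Python module)
def pvUnitSuffixes : List (List Char × List Char) :=
  [("_kNm".toList, " (kNm)".toList), ("_kN".toList, " (kN)".toList),
   ("_MPa".toList, " (MPa)".toList), ("_GPa".toList, " (GPa)".toList),
   ("_mm".toList, " (mm)".toList), ("_cm2".toList, " (cm²)".toList),
   ("_cm3".toList, " (cm³)".toList), ("_cm4".toList, " (cm⁴)".toList),
   ("_m".toList, " (m)".toList)]

def pvSubItems : List (List Char × List Char) :=
  [("M_Rd".toList, "M<sub>Rd</sub>".toList),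
   ("N_Rd".toList, "N<sub>Rd</sub>".toList),
   ("V_Rd".toList, "V<sub>Rd</sub>".toList),
   ("M_Ed".toList, "M<sub>Ed</sub>".toList),
   ("N_Ed".toList, "N<sub>Ed</sub>".toList),
   ("V_Ed".toList, "V<sub>Ed</sub>".toList),
   ("N_b_Rd".toList, "N<sub>b,Rd</sub>".toList),
   ("Fv_Rd".toList, "F<sub>v,Rd</sub>".toList),
   ("Fv".toList, "F<sub>v</sub>".toList),
   ("fy".toList, "f<sub>y</sub>".toList),
   ("fu".toList, "f<sub>u</sub>".toList),
   ("fub".toList, "f<sub>ub</sub>".toList),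
   ("Wpl".toList, "W<sub>pl</sub>".toList),
   ("Wel".toList, "W<sub>el</sub>".toList),
   ("L_cr".toList, "L<sub>cr</sub>".toList),
   ("gamma_M0".toList, "γ<sub>M0</sub>".toList),
   ("gamma_M1".toList, "γ<sub>M1</sub>".toList),
   ("gamma_M2".toList, "γ<sub>M2</sub>".toList),
   ("alpha_v".toList, "α<sub>v</sub>".toList)]

def pvSubDict : PySem.Dict (List Char) (List Char) := PySem.Dict.ofList pvSubItems

-- ===== PORT A =====
-- the unit-suffix loop (breaks at the first matching suffix)
def pvStripUnitA : List (List Char × List Char) → List Char → List Char × List Char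
  | [], base => (base, [])
  | (suf, lab) :: tl, base =>
    if PySem.Chars.endswith base suf then
      (PySem.List.slice base none (some (-(suf.length : Int))), lab)
    else pvStripUnitA tl base

-- the loop over sorted_subs: exact match, then startswith(pattern + "_")
def pvSubLoopA : List (List Char × List Char) → List Char → List Char → List Char
  | [], base, unit => PySem.Chars.replace base ['_'] [' '] ++ unit
  | (p, r) :: tl, base, unit =>
    if base = p then r ++ unit
    else if PySem.Chars.startswith base (p ++ ['_']) then
      r ++ [' '] ++
        PySem.Chars.replace (PySem.List.slice base (some ((p.length : Int) + 1)) none) ['_'] [' ']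
        ++ unit
    else pvSubLoopA tl base unit

def pretty_key (key : String) : String :=
  let bu := pvStripUnitA pvUnitSuffixes key.toList
  String.ofList (pvSubLoopA
    (PySem.List.sorted pvSubDict.items (fun x => -(x.1.length : Int)) false) bu.1 bu.2)

-- ===== PORT B =====
-- the same unit-suffix loop (Source B keeps it unchanged)
def pvStripUnitB : List (List Char × List Char) → List Char → List Char × List Char
  | [], base => (base, [])
  | (suf, lab) :: tl, base =>
    if PySem.Chars.endswith base suf then
      (PySem.List.slice base none (some (-(suf.length : Int))), lab)
    else pvStripUnitB tl base

-- for i in range(len(base)-1, -1, -1): the argument n visits index n-1 first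
def pvScanB (base unit : List Char) : Nat → List Char
  | 0 => PySem.Chars.replace base ['_'] [' '] ++ unit
  | i + 1 =>
    if PySem.List.pyGet? base (i : Int) = some '_' then
      match pvSubDict.get? (PySem.List.slice base none (some (i : Int))) with
      | some r =>
        r ++ [' '] ++
          PySem.Chars.replace (PySem.List.slice base (some ((i : Int) + 1)) none) ['_'] [' ']
          ++ unit
      | none => pvScanB base unit i
    else pvScanB base unit i

def pretty_key_alt (key : String) : String :=
  let bu := pvStripUnitB pvUnitSuffixes key.toList
  match pvSubDict.get? bu.1 with
  | some r => String.ofList (r ++ bu.2)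
  | none => String.ofList (pvScanB bu.1 bu.2 bu.1.length)

-- ===== PRECONDITION & SPEC =====
def Spec_pretty_key (key : String) (out : String) : Prop := out = pretty_key_alt key
instance (key : String) (out : String) : Decidable (Spec_pretty_key key out) := by unfold Spec_pretty_key; infer_instance

-- ===== CLAIM (what is proved, stated in full; the proofs are below) =====
def Claim_equal_pretty_key : Prop := ∀ (key : String), Dom_pretty_key key → Spec_pretty_key key (pretty_key key)

-- ===== LEMMAS AND PROOFS =====

-- the sorted subscript table, as the literal list Python's stable sort produces
def pvSortedSubs : List (List Char × List Char) :=
  [("gamma_M0".toList, "γ<sub>M0</sub>".toList),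
   ("gamma_M1".toList, "γ<sub>M1</sub>".toList),
   ("gamma_M2".toList, "γ<sub>M2</sub>".toList),
   ("alpha_v".toList, "α<sub>v</sub>".toList),
   ("N_b_Rd".toList, "N<sub>b,Rd</sub>".toList),
   ("Fv_Rd".toList, "F<sub>v,Rd</sub>".toList),
   ("M_Rd".toList, "M<sub>Rd</sub>".toList),
   ("N_Rd".toList, "N<sub>Rd</sub>".toList),
   ("V_Rd".toList, "V<sub>Rd</sub>".toList),
   ("M_Ed".toList, "M<sub>Ed</sub>".toList),
   ("N_Ed".toList, "N<sub>Ed</sub>".toList),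
   ("V_Ed".toList, "V<sub>Ed</sub>".toList),
   ("L_cr".toList, "L<sub>cr</sub>".toList),
   ("fub".toList, "f<sub>ub</sub>".toList),
   ("Wpl".toList, "W<sub>pl</sub>".toList),
   ("Wel".toList, "W<sub>el</sub>".toList),
   ("Fv".toList, "F<sub>v</sub>".toList),
   ("fy".toList, "f<sub>y</sub>".toList),
   ("fu".toList, "f<sub>u</sub>".toList)]

theorem pv_sorted_eq :
    PySem.List.sorted pvSubDict.items (fun x => -(x.1.length : Int)) false = pvSortedSubs := by
  decide

theorem pv_strip_eq (l : List (List Char × List Char)) (b : List Char) :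
    pvStripUnitB l b = pvStripUnitA l b := by
  induction l with
  | nil => rfl
  | cons h tl ih => cases h with | mk suf lab => simp [pvStripUnitA, pvStripUnitB, ih]

-- one "hit" of B's scan at split point i
def pvHit (base : List Char) (i : Nat) : Option (List Char) :=
  if base[i]? = some '_' then pvSubDict.get? (base.take i) else none

def pvBestHit (base : List Char) : Nat → Option (Nat × List Char)
  | 0 => none
  | i + 1 =>
    match pvHit base i with
    | some r => some (i, r)
    | none => pvBestHit base i

theorem pv_scanB_eq (base unit : List Char) (n : Nat) :
    pvScanB base unit n =
      match pvBestHit base n with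
      | some (i, r) =>
          r ++ [' '] ++ PySem.Chars.replace (base.drop (i + 1)) ['_'] [' '] ++ unit
      | none => PySem.Chars.replace base ['_'] [' '] ++ unit := by
  induction n with
  | zero => rfl
  | succ i ih =>
    have hcast : ((i : Int) + 1) = ((i + 1 : Nat) : Int) := by push_cast; ring
    simp only [pvScanB, pvBestHit, pvHit, PySem.List.pyGet?_natCast,
      PySem.List.slice_to_natCast, hcast, PySem.List.slice_from_natCast]
    by_cases h : base[i]? = some '_'
    · simp only [h, if_pos]
      cases hg : pvSubDict.get? (base.take i) with
      | some r => simp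
      | none => simpa using ih
    · simp only [h, ite_false]
      simpa using ih

theorem pv_bestHit_none {base : List Char} {n : Nat} (h : pvBestHit base n = none) :
    ∀ i, i < n → pvHit base i = none := by
  induction n with
  | zero => omega
  | succ m ih =>
    intro i hi
    simp only [pvBestHit] at h
    cases hm : pvHit base m with
    | some r => rw [hm] at h; exact absurd h (by simp)
    | none =>
      rw [hm] at h
      rcases Nat.lt_succ_iff_lt_or_eq.mp hi with h' | rfl
      · exact ih h i h'
      · exact hm

theorem pv_bestHit_some {base : List Char} {n i : Nat} {r : List Char}
    (h : pvBestHit base n = some (i, r)) :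
    pvHit base i = some r ∧ i < n ∧ ∀ j, i < j → j < n → pvHit base j = none := by
  induction n with
  | zero => simp [pvBestHit] at h
  | succ m ih =>
    simp only [pvBestHit] at h
    cases hm : pvHit base m with
    | some r' =>
      rw [hm] at h
      simp only [Option.some.injEq, Prod.mk.injEq] at h
      obtain ⟨rfl, rfl⟩ := h
      exact ⟨hm, Nat.lt_succ_self _, fun j h1 h2 => by omega⟩
    | none =>
      rw [hm] at h
      obtain ⟨h1, h2, h3⟩ := ih h
      refine ⟨h1, by omega, fun j hj1 hj2 => ?_⟩
      rcases Nat.lt_succ_iff_lt_or_eq.mp hj2 with h' | rfl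
      · exact h3 j hj1 h'
      · exact hm

-- keys of the table look up to their values (closed fact)
theorem pv_key_lookup : ∀ x ∈ pvSortedSubs, pvSubDict.get? x.1 = some x.2 := by decide

theorem pv_items_eq : pvSubDict.items = pvSubItems := by decide

theorem pv_mem_sorted_of_mem_items : ∀ x ∈ pvSubItems, x ∈ pvSortedSubs := by decide

theorem pv_sorted_pairwise :
    pvSortedSubs.Pairwise (fun a b => b.1.length ≤ a.1.length) := by decide

-- a startswith(pattern + "_") match IS a hit at split point pattern.length
theorem pv_match_hit {base p r : List Char} (hm : (p, r) ∈ pvSortedSubs)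
    (hs : PySem.Chars.startswith base (p ++ ['_']) = true) :
    pvHit base p.length = some r ∧ p.length < base.length ∧ base.take p.length = p := by
  obtain ⟨t, ht⟩ := (PySem.Chars.startswith_iff _ _).mp hs
  have hb : base = p ++ '_' :: t := by rw [← ht]; simp
  subst hb
  have htake : (p ++ '_' :: t).take p.length = p := List.take_left
  have hget : (p ++ '_' :: t)[p.length]? = some '_' := by
    simp
  refine ⟨?_, by simp, htake⟩
  simp only [pvHit, hget, if_pos, htake]
  exact pv_key_lookup (p, r) hm

-- a hit comes from a unique startswith match
theorem pv_hit_match {base : List Char} {i : Nat} {r : List Char}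
    (h : pvHit base i = some r) :
    (base.take i, r) ∈ pvSortedSubs ∧ (base.take i).length = i ∧
      PySem.Chars.startswith base (base.take i ++ ['_']) = true := by
  simp only [pvHit] at h
  by_cases hu : base[i]? = some '_'
  · rw [if_pos hu] at h
    obtain ⟨hlt, hv⟩ := List.getElem?_eq_some_iff.mp hu
    have hmem : (base.take i, r) ∈ pvSubDict.items := PySem.Dict.mem_items_of_get?_eq_some _ h
    rw [pv_items_eq] at hmem
    refine ⟨pv_mem_sorted_of_mem_items _ hmem, by simp; omega, ?_⟩
    apply (PySem.Chars.startswith_iff _ _).mpr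
    refine ⟨base.drop (i + 1), ?_⟩
    rw [List.append_assoc]
    conv_rhs => rw [← List.take_append_drop i base]
    rw [List.drop_eq_getElem_cons hlt, hv]
    rfl
  · rw [if_neg hu] at h; exact absurd h (by simp)

-- A's loop when nothing matches
theorem pv_loopA_nomatch (base unit : List Char) :
    ∀ l : List (List Char × List Char),
      (∀ q s, (q, s) ∈ l → base ≠ q ∧ PySem.Chars.startswith base (q ++ ['_']) = false) →
      pvSubLoopA l base unit = PySem.Chars.replace base ['_'] [' '] ++ unit := by
  intro l
  induction l with
  | nil => intro _; rfl
  | cons hd tl ih =>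
    intro hall
    obtain ⟨q, sv⟩ := hd
    obtain ⟨hne, hsw⟩ := hall q sv (by simp)
    simp only [pvSubLoopA, if_neg hne, hsw, Bool.false_eq_true, if_false]
    exact ih fun q' s' hm => hall q' s' (by simp [hm])

-- A's loop walks to the longest-prefix hit
theorem pv_loopA_hit (base unit : List Char) (i₀ : Nat) (r₀ : List Char)
    (hlen : (base.take i₀).length = i₀)
    (hsw₀ : PySem.Chars.startswith base (base.take i₀ ++ ['_']) = true) :
    ∀ l : List (List Char × List Char),
      l.Pairwise (fun a b => b.1.length ≤ a.1.length) →
      (base.take i₀, r₀) ∈ l →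
      (∀ q s, (q, s) ∈ l → base ≠ q) →
      (∀ q s, (q, s) ∈ l → PySem.Chars.startswith base (q ++ ['_']) = true →
        q.length ≤ i₀ ∧ (q.length = i₀ → q = base.take i₀ ∧ s = r₀)) →
      pvSubLoopA l base unit =
        r₀ ++ [' '] ++ PySem.Chars.replace (base.drop (i₀ + 1)) ['_'] [' '] ++ unit := by
  intro l
  induction l with
  | nil => intro _ hmem; simp at hmem
  | cons hd tl ih =>
    intro hpw hmem hne hmatch
    obtain ⟨q, sv⟩ := hd
    have hpw' := (List.pairwise_cons.mp hpw).2
    have hhd := (List.pairwise_cons.mp hpw).1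
    have hneq : base ≠ q := hne q sv (by simp)
    by_cases hsw : PySem.Chars.startswith base (q ++ ['_']) = true
    · -- the head matches: it must be exactly the best hit
      obtain ⟨hle, hexact⟩ := hmatch q sv (by simp) hsw
      have hge : i₀ ≤ q.length := by
        rcases List.mem_cons.mp hmem with heq | hmem'
        · have hq' : q = base.take i₀ := by rw [Prod.mk.injEq] at heq; exact heq.1.symm
          rw [hq', hlen]
        · have := hhd _ hmem'
          simpa [hlen] using this
      have hqi : q.length = i₀ := le_antisymm hle hge
      obtain ⟨hq, hs⟩ := hexact hqi
      have hcast : ((q.length : Int) + 1) = ((i₀ + 1 : Nat) : Int) := by rw [hqi]; push_cast; ring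
      simp only [pvSubLoopA, if_neg hneq, hsw, if_pos, hcast, PySem.List.slice_from_natCast, hs]
    · -- the head does not match: recurse
      have hmem' : (base.take i₀, r₀) ∈ tl := by
        rcases List.mem_cons.mp hmem with heq | h'
        · exfalso
          rw [Prod.mk.injEq] at heq
          rw [heq.1] at hsw₀
          exact hsw hsw₀
        · exact h'
      simp only [pvSubLoopA, if_neg hneq, hsw, Bool.false_eq_true, if_false]
      exact ih hpw' hmem' (fun q' s' hm => hne q' s' (by simp [hm]))
        (fun q' s' hm => hmatch q' s' (by simp [hm]))

-- the central lemma: A's table scan equals B's lookup-plus-underscore-scan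
theorem pv_core (base unit : List Char) :
    pvSubLoopA pvSortedSubs base unit =
      match pvSubDict.get? base with
      | some r => r ++ unit
      | none => pvScanB base unit base.length := by
  cases h : pvSubDict.get? base with
  | some r =>
    have hmem : (base, r) ∈ pvSubDict.items := PySem.Dict.mem_items_of_get?_eq_some _ h
    rw [pv_items_eq] at hmem
    simp only [pvSubItems, List.mem_cons, List.not_mem_nil, or_false, Prod.mk.injEq] at hmem
    rcases hmem with ⟨rfl,rfl⟩|⟨rfl,rfl⟩|⟨rfl,rfl⟩|⟨rfl,rfl⟩|⟨rfl,rfl⟩|⟨rfl,rfl⟩|⟨rfl,rfl⟩|⟨rfl,rfl⟩|⟨rfl,rfl⟩|⟨rfl,rfl⟩|⟨rfl,rfl⟩|⟨rfl,rfl⟩|⟨rfl,rfl⟩|⟨rfl,rfl⟩|⟨rfl,rfl⟩|⟨rfl,rfl⟩|⟨rfl,rfl⟩|⟨rfl,rfl⟩|⟨rfl,rfl⟩ <;> rfl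
  | none =>
    have hne : ∀ q s, (q, s) ∈ pvSortedSubs → base ≠ q := by
      intro q sv hm heq
      subst heq
      rw [pv_key_lookup (base, sv) hm] at h
      exact absurd h (by simp)
    rw [pv_scanB_eq]
    cases hb : pvBestHit base base.length with
    | none =>
      have hnone := pv_bestHit_none hb
      apply pv_loopA_nomatch
      intro q sv hm
      refine ⟨hne q sv hm, ?_⟩
      by_contra hsw
      rw [Bool.not_eq_false] at hsw
      obtain ⟨hhit, hlt, _⟩ := pv_match_hit hm hsw
      rw [hnone q.length hlt] at hhit
      exact absurd hhit (by simp)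
    | some ir =>
      obtain ⟨i₀, r₀⟩ := ir
      obtain ⟨hhit, hilt, hmax⟩ := pv_bestHit_some hb
      obtain ⟨hp, hlen, hsw₀⟩ := pv_hit_match hhit
      rw [pv_loopA_hit base unit i₀ r₀ hlen hsw₀ pvSortedSubs pv_sorted_pairwise hp hne ?_]
      intro q sv hm hsw
      obtain ⟨hhitq, hltq, htakeq⟩ := pv_match_hit hm hsw
      have hle : q.length ≤ i₀ := by
        by_contra hgt
        rw [hmax q.length (by omega) hltq] at hhitq
        exact absurd hhitq (by simp)
      refine ⟨hle, fun hqi => ?_⟩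
      rw [hqi] at hhitq htakeq
      rw [hhit] at hhitq
      exact ⟨htakeq.symm, by injection hhitq; simp_all⟩

-- ===== VERDICT (by name: the statement is the Claim_ definition above) =====
theorem pretty_key_spec : Claim_equal_pretty_key := by
  intro key _
  unfold Spec_pretty_key pretty_key pretty_key_alt
  rw [pv_strip_eq]
  cases hbu : pvStripUnitA pvUnitSuffixes key.toList with
  | mk b u =>
    show String.ofList (pvSubLoopA (PySem.List.sorted pvSubDict.items
        (fun x => -(x.1.length : Int)) false) b u) =
      match pvSubDict.get? b with
      | some r => String.ofList (r ++ u)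
      | none => String.ofList (pvScanB b u b.length)
    rw [pv_sorted_eq, pv_core]
    cases h : pvSubDict.get? b <;> simp
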